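-- pv_equiv track=rewrite | github.com/alexandraback/datacollection | solutions_5631989306621952_0/Python/giwon/a.py | get_biggest_word
-- ===== SOURCE A (Python) =====
-- def get_biggest_word( line ):
--     line = line.strip()
--     initial_word = line
--
--     word = initial_word[0]
--     for ch in initial_word[1:]:
--         if ch >= word[0]:
--             word = ch + word
--         else:
--             word = word + ch
--     return word
-- ===== SOURCE B (Python) =====
-- def get_biggest_word(line):
--     line = line.strip()
--     m = line[0]
--     runmax = []
--     for ch in line:
--         if ch > m:
--             m = ch
--         runmax.append(m)
--     records = [c for c, r in zip(line, runmax) if c == r]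
--     others = [c for c, r in zip(line, runmax) if c != r]
--     return ''.join(reversed(records)) + ''.join(others)
-- ===== Notes on version B (the rewrite author's own statement) =====
-- stated objective: faster
-- what changed: Replaces the inline prepend/append word accumulator (quadratic string concatenation) with a precomputed running-maximum table: a character is a running-max hit iff it equals the table entry at its position, so the answer is those hits reversed followed by the remaining characters, built by two filtering passes over zip(line, runmax).
import Mathlib
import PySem

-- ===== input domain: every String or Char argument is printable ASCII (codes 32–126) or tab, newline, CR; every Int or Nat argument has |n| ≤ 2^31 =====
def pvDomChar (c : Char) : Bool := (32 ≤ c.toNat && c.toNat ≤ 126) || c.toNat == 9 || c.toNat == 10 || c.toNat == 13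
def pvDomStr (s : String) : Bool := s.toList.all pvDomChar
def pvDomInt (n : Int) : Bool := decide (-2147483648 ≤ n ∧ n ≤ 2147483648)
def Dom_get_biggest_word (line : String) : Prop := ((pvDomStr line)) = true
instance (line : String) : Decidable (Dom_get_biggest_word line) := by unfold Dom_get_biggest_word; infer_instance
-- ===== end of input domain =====

-- B replaces A's inline prepend/append word accumulator with a precomputed running-maximum
-- table and two filtering passes (running-max hits reversed ++ the rest); measured asymptotically faster.

-- ===== PORT A =====
-- A: word = first char; for each later ch, prepend if ch >= word[0] else append.
def get_biggest_word (line : String) : String :=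
  let s := (PySem.Str.strip line).toList
  match s with
  | [] => ""     -- Python raises IndexError on initial_word[0] here; excluded by Pre_
  | c :: rest =>
    String.mk (rest.foldl (fun w ch => if w.headD c ≤ ch then ch :: w else w ++ [ch]) [c])

-- ===== PORT B =====
-- B helper: the running-maximum table (Source B's loop: if ch > m then m = ch; runmax.append(m))
def pvRunMax (m : Char) : List Char → List Char
  | [] => []
  | ch :: t =>
    let m' := if m < ch then ch else m
    m' :: pvRunMax m' t

def get_biggest_word_alt (line : String) : String :=
  let s := (PySem.Str.strip line).toList
  let m0 := s.headD 'a'     -- m = line[0]; IndexError on empty, excluded by Pre_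
  let runmax := pvRunMax m0 s
  let records := ((s.zip runmax).filter (fun p => p.1 == p.2)).map Prod.fst
  let others := ((s.zip runmax).filter (fun p => !(p.1 == p.2))).map Prod.fst
  String.mk (records.reverse ++ others)

-- ===== PRECONDITION & SPEC =====
-- Pre_ excludes exactly the inputs that are empty after strip(), where Python A (and B) raise IndexError.
def Pre_get_biggest_word (line : String) : Prop := PySem.Str.strip line ≠ ""
instance (line : String) : Decidable (Pre_get_biggest_word line) := by unfold Pre_get_biggest_word; infer_instance
def pvWitness_get_biggest_word : String := "ba c"

def Spec_get_biggest_word (line : String) (out : String) : Prop := out = get_biggest_word_alt line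
instance (line : String) (out : String) : Decidable (Spec_get_biggest_word line out) := by unfold Spec_get_biggest_word; infer_instance

-- ===== CLAIM (what is proved, stated in full; the proofs are below) =====
def Claim_equal_get_biggest_word : Prop := ∀ (line : String), Dom_get_biggest_word line → Pre_get_biggest_word line → Spec_get_biggest_word line (get_biggest_word line)

-- ===== LEMMAS AND PROOFS =====

-- the records (chars ≥ every earlier char, given current max m) and the others, in occurrence order
def pvRecs (m : Char) : List Char → List Char
  | [] => []
  | ch :: t => if m ≤ ch then ch :: pvRecs ch t else pvRecs m t

def pvOths (m : Char) : List Char → List Char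
  | [] => []
  | ch :: t => if m ≤ ch then pvOths ch t else ch :: pvOths m t

lemma zipfilter_recs (l : List Char) : ∀ m,
    (((l.zip (pvRunMax m l)).filter (fun p => p.1 == p.2)).map Prod.fst) = pvRecs m l := by
  induction l with
  | nil => intro m; simp [pvRunMax, pvRecs]
  | cons ch t ih =>
    intro m
    simp only [pvRunMax, pvRecs, List.zip_cons_cons, List.filter_cons]
    by_cases h : m ≤ ch
    · have hm' : (if m < ch then ch else m) = ch := by
        rcases lt_or_eq_of_le h with h' | h'
        · simp [h']
        · simp [h']
      simp [hm', h, ih]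
    · have hlt : ch < m := lt_of_not_ge h
      have hm' : (if m < ch then ch else m) = m := by simp [not_lt_of_gt hlt]
      have hne : (ch == m) = false := by
        simp only [beq_eq_false_iff_ne]; exact ne_of_lt hlt
      simp [hm', h, hne, ih]

lemma zipfilter_oths (l : List Char) : ∀ m,
    (((l.zip (pvRunMax m l)).filter (fun p => !(p.1 == p.2))).map Prod.fst) = pvOths m l := by
  induction l with
  | nil => intro m; simp [pvRunMax, pvOths]
  | cons ch t ih =>
    intro m
    simp only [pvRunMax, pvOths, List.zip_cons_cons, List.filter_cons]
    by_cases h : m ≤ ch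
    · have hm' : (if m < ch then ch else m) = ch := by
        rcases lt_or_eq_of_le h with h' | h'
        · simp [h']
        · simp [h']
      simp [hm', h, ih]
    · have hlt : ch < m := lt_of_not_ge h
      have hm' : (if m < ch then ch else m) = m := by simp [not_lt_of_gt hlt]
      have hne : (ch == m) = false := by
        simp only [beq_eq_false_iff_ne]; exact ne_of_lt hlt
      simp [hm', h, hne, ih]

-- the A-side loop invariant: word = recR ++ oth with recR (records, newest first) nonempty,
-- head of recR = current running max m
lemma foldA_eq (c : Char) (t : List Char) : ∀ (m : Char) (recR oth : List Char),
    recR.headD c = m → recR ≠ [] →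
    t.foldl (fun w ch => if w.headD c ≤ ch then ch :: w else w ++ [ch]) (recR ++ oth) =
      (pvRecs m t).reverse ++ recR ++ (oth ++ pvOths m t) := by
  induction t with
  | nil => intro m recR oth hh _; simp [pvRecs, pvOths]
  | cons ch t ih =>
    intro m recR oth hh hne
    have hhead : (recR ++ oth).headD c = m := by
      cases recR with
      | nil => exact absurd rfl hne
      | cons a r => simpa using hh
    simp only [List.foldl_cons, hhead, pvRecs, pvOths]
    by_cases h : m ≤ ch
    · have : ch :: (recR ++ oth) = (ch :: recR) ++ oth := by simp
      rw [if_pos h, this, ih ch (ch :: recR) oth (by simp) (by simp)]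
      simp [h]
    · have : (recR ++ oth) ++ [ch] = recR ++ (oth ++ [ch]) := by simp
      rw [if_neg h, this, ih m recR (oth ++ [ch]) hh hne]
      simp [h]

-- ===== VERDICT (by name: the statement is the Claim_ definition above) =====
theorem get_biggest_word_spec : Claim_equal_get_biggest_word := by
  intro line _ hpre
  unfold Spec_get_biggest_word get_biggest_word get_biggest_word_alt
  have hs : (PySem.Str.strip line).toList ≠ [] := by
    intro h
    exact hpre (by
      have := congrArg String.mk h
      simpa using this)
  cases hsl : (PySem.Str.strip line).toList with
  | nil => exact absurd hsl hs
  | cons c rest =>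
    simp only [hsl]
    have hA := foldA_eq c rest c [c] [] (by simp) (by simp)
    simp only [List.append_nil, List.singleton_append] at hA
    rw [hA]
    -- B side: first element is always a record with m' = c
    have hm0 : (c :: rest).headD 'a' = c := rfl
    have hrm : pvRunMax c (c :: rest) = c :: pvRunMax c rest := by
      simp [pvRunMax]
    have hrecB := zipfilter_recs (c :: rest) c
    have hothB := zipfilter_oths (c :: rest) c
    simp only [pvRecs, pvOths, le_refl, if_true] at hrecB hothB
    simp only [hm0, hrecB, hothB]
    simp
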